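-- pv_equiv track=rewrite | github.com/crazieeKinG/E2EE_chat_application | Client/IDEA/key_generation.py | break_key
-- ===== SOURCE A (Python) =====
-- from math import floor
--
-- def break_key(key):
--     key_list = list()
--     prev_key = 0
--     for i in range(16):
--         prev_key = (key - prev_key) % (256**(i+1))
--         character = floor(prev_key / (256**(i)))
--         key_list.append(character)
--     key_list.reverse()
--     return key_list
-- ===== SOURCE B (Python) =====
-- def break_key(key):
--     return [(key >> (8 * i)) % 256 for i in range(15, -1, -1)]
-- ===== Notes on version B (the rewrite author's own statement) =====
-- stated objective: simpler
-- what changed: Replaced the loop that threads a running remainder (prev_key) plus a final reverse by a single comprehension extracting each byte independently with a shift and a mod, most significant byte first.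
import Mathlib
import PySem

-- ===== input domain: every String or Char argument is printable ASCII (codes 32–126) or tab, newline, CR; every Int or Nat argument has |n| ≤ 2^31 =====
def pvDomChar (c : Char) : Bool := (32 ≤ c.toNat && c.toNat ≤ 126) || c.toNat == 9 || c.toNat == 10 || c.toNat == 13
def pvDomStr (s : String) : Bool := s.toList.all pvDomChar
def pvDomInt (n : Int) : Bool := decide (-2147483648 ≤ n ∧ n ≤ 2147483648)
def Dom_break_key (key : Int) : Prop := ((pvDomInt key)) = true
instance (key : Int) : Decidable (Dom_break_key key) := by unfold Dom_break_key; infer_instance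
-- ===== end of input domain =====

-- B replaces A's remainder-threading loop plus final reverse by independent shift/mod
-- byte extraction, most significant byte first (simpler).

-- ===== PORT A =====
-- floor(prev_key / 256**i) uses float division in Python; on this domain it is exact
-- and equals integer floor division, so it is ported as PySem.Int.floordiv.
def break_key (key : Int) : List Int :=
  let st := (PySem.List.pyRange 0 16 1).foldl
    (fun (st : List Int × Int) i =>
      let prev_key := PySem.Int.mod (key - st.2) ((256 : Int) ^ (i + 1).toNat)
      let character := PySem.Int.floordiv prev_key ((256 : Int) ^ i.toNat)
      (st.1 ++ [character], prev_key))
    ([], 0)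
  st.1.reverse

-- ===== PORT B =====
-- Python's  key >> (8*i)  is Lean's  key >>> (8*i).toNat  (arithmetic shift, exact).
def break_key_alt (key : Int) : List Int :=
  (PySem.List.pyRange 15 (-1) (-1)).map
    (fun i => PySem.Int.mod (key >>> (8 * i).toNat) 256)

-- ===== PRECONDITION & SPEC =====
def Spec_break_key (key : Int) (out : List Int) : Prop := out = break_key_alt key
instance (key : Int) (out : List Int) : Decidable (Spec_break_key key out) := by unfold Spec_break_key; infer_instance

-- ===== CLAIM (what is proved, stated in full; the proofs are below) =====
def Claim_equal_break_key : Prop := ∀ (key : Int), Dom_break_key key → Spec_break_key key (break_key key)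

-- ===== LEMMAS AND PROOFS =====

-- the running remainder of A, as a pure recursion (prev_key after iteration i-1)
def pvPrev (key : Int) : Nat → Int
  | 0 => 0
  | i + 1 => PySem.Int.mod (key - pvPrev key i) ((256 : Int) ^ (i + 1))

-- the byte A appends at iteration i
def pvByte (key : Int) (i : Nat) : Int :=
  PySem.Int.floordiv (pvPrev key (i + 1)) ((256 : Int) ^ i)

theorem pv_pow_pos (i : Nat) : (0 : Int) < 256 ^ i := by positivity

-- key % 256^i ≤ key % 256^(i+1)
theorem pv_emod_mono (key : Int) (i : Nat) :
    key % (256 : Int) ^ i ≤ key % (256 : Int) ^ (i + 1) := by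
  have hdvd : ((256 : Int) ^ i) ∣ (256 : Int) ^ (i + 1) := pow_dvd_pow _ (by omega)
  have h1 : (key % 256 ^ (i + 1)) % 256 ^ i = key % 256 ^ i := Int.emod_emod_of_dvd key hdvd
  have h2 : (0 : Int) ≤ key % 256 ^ (i + 1) :=
    Int.emod_nonneg key (ne_of_gt (pv_pow_pos (i + 1)))
  have h3 : (0 : Int) ≤ (key % 256 ^ (i + 1)) / 256 ^ i :=
    Int.ediv_nonneg h2 (le_of_lt (pv_pow_pos i))
  have h4 := Int.emod_def (key % 256 ^ (i + 1)) ((256 : Int) ^ i)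
  nlinarith [mul_nonneg (le_of_lt (pv_pow_pos i)) h3]

-- invariant: prev_key stays between 0 and key % 256^i
theorem pv_bounds (key : Int) : ∀ i : Nat,
    0 ≤ pvPrev key i ∧ pvPrev key i ≤ key % (256 : Int) ^ i := by
  intro i
  induction i with
  | zero => simp [pvPrev]
  | succ i ih =>
    obtain ⟨h0, h1⟩ := ih
    have hBpos := pv_pow_pos (i + 1)
    have hmodlt : key % (256 : Int) ^ (i + 1) < 256 ^ (i + 1) :=
      Int.emod_lt_of_pos key hBpos
    have hmono := pv_emod_mono key i
    have hrange : 0 ≤ key % 256 ^ (i + 1) - pvPrev key i ∧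
        key % 256 ^ (i + 1) - pvPrev key i < 256 ^ (i + 1) := by constructor <;> omega
    have hstep : pvPrev key (i + 1) = key % 256 ^ (i + 1) - pvPrev key i := by
      show PySem.Int.mod (key - pvPrev key i) ((256 : Int) ^ (i + 1)) = _
      rw [PySem.Int.mod_eq_emod_of_pos hBpos, Int.sub_emod,
        Int.emod_eq_of_lt h0 (by omega)]
      exact Int.emod_eq_of_lt hrange.1 hrange.2
    rw [hstep]
    omega

-- prev_key after iteration i equals key % 256^(i+1) minus the previous remainder
theorem pv_succ (key : Int) (i : Nat) :
    pvPrev key (i + 1) = key % (256 : Int) ^ (i + 1) - pvPrev key i := by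
  obtain ⟨h0, h1⟩ := pv_bounds key i
  have hBpos := pv_pow_pos (i + 1)
  have hmono := pv_emod_mono key i
  have hmodlt : key % (256 : Int) ^ (i + 1) < 256 ^ (i + 1) := Int.emod_lt_of_pos key hBpos
  show PySem.Int.mod (key - pvPrev key i) ((256 : Int) ^ (i + 1)) = _
  rw [PySem.Int.mod_eq_emod_of_pos hBpos, Int.sub_emod,
    Int.emod_eq_of_lt h0 (by omega)]
  exact Int.emod_eq_of_lt (by omega) (by omega)

-- key % 256^(i+1) splits into byte i and the lower remainder
theorem pv_emod_split (key : Int) (i : Nat) :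
    key % (256 : Int) ^ (i + 1)
      = 256 ^ i * ((key / 256 ^ i) % 256) + key % 256 ^ i := by
  have hb := pv_pow_pos i
  have e1 : (256 : Int) ^ i * (key / 256 ^ i) + key % 256 ^ i = key :=
    Int.mul_ediv_add_emod key _
  have e2 : (256 : Int) * ((key / 256 ^ i) / 256) + (key / 256 ^ i) % 256 = key / 256 ^ i :=
    Int.mul_ediv_add_emod _ 256
  have e3 : key / 256 ^ i / 256 = key / 256 ^ (i + 1) := by
    rw [Int.ediv_ediv_of_nonneg (le_of_lt hb), pow_succ]
  have e4 : key % (256 : Int) ^ (i + 1) = key - 256 ^ (i + 1) * (key / 256 ^ (i + 1)) :=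
    Int.emod_def key _
  have e5 : (256 : Int) ^ (i + 1) = 256 ^ i * 256 := pow_succ 256 i
  rw [e4, ← e3, e5]
  nlinarith [e1, e2]

-- A's byte i is the i-th base-256 digit
theorem pv_byte_eq (key : Int) (i : Nat) :
    pvByte key i = (key / (256 : Int) ^ i) % 256 := by
  have hb := pv_pow_pos i
  obtain ⟨h0, h1⟩ := pv_bounds key i
  have hmodlt : key % (256 : Int) ^ i < 256 ^ i := Int.emod_lt_of_pos key hb
  have hmodnn : (0 : Int) ≤ key % 256 ^ i := Int.emod_nonneg key (ne_of_gt hb)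
  rw [pvByte, PySem.Int.floordiv_eq_ediv_of_pos (pv_pow_pos i), pv_succ, pv_emod_split]
  have : (256 : Int) ^ i * ((key / 256 ^ i) % 256) + key % 256 ^ i - pvPrev key i
      = (key % 256 ^ i - pvPrev key i) + 256 ^ i * ((key / 256 ^ i) % 256) := by ring
  rw [this, Int.add_mul_ediv_left _ _ (ne_of_gt hb),
    Int.ediv_eq_zero_of_lt (by omega) (by omega), zero_add]

theorem pv_A_explicit (key : Int) : break_key key =
    [pvByte key 15, pvByte key 14, pvByte key 13, pvByte key 12,
     pvByte key 11, pvByte key 10, pvByte key 9, pvByte key 8,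
     pvByte key 7, pvByte key 6, pvByte key 5, pvByte key 4,
     pvByte key 3, pvByte key 2, pvByte key 1, pvByte key 0] := by
  show (((PySem.List.pyRange 0 16 1).foldl _ ([], 0)).1).reverse = _
  norm_num [show PySem.List.pyRange 0 16 1 = [0,1,2,3,4,5,6,7,8,9,10,11,12,13,14,15] from by decide,
    List.foldl, pvByte, pvPrev, Int.toNat]

theorem pv_B_explicit (key : Int) : break_key_alt key =
    [PySem.Int.mod (key >>> ((Int.toNat (8 * 15) : Int))) 256, PySem.Int.mod (key >>> ((Int.toNat (8 * 14) : Int))) 256,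
     PySem.Int.mod (key >>> ((Int.toNat (8 * 13) : Int))) 256, PySem.Int.mod (key >>> ((Int.toNat (8 * 12) : Int))) 256,
     PySem.Int.mod (key >>> ((Int.toNat (8 * 11) : Int))) 256, PySem.Int.mod (key >>> ((Int.toNat (8 * 10) : Int))) 256,
     PySem.Int.mod (key >>> ((Int.toNat (8 * 9) : Int))) 256, PySem.Int.mod (key >>> ((Int.toNat (8 * 8) : Int))) 256,
     PySem.Int.mod (key >>> ((Int.toNat (8 * 7) : Int))) 256, PySem.Int.mod (key >>> ((Int.toNat (8 * 6) : Int))) 256,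
     PySem.Int.mod (key >>> ((Int.toNat (8 * 5) : Int))) 256, PySem.Int.mod (key >>> ((Int.toNat (8 * 4) : Int))) 256,
     PySem.Int.mod (key >>> ((Int.toNat (8 * 3) : Int))) 256, PySem.Int.mod (key >>> ((Int.toNat (8 * 2) : Int))) 256,
     PySem.Int.mod (key >>> ((Int.toNat (8 * 1) : Int))) 256, PySem.Int.mod (key >>> ((Int.toNat (8 * 0) : Int))) 256] := by
  simp only [break_key_alt,
    show PySem.List.pyRange 15 (-1) (-1) = [15,14,13,12,11,10,9,8,7,6,5,4,3,2,1,0] from by decide,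
    List.map]

-- ===== VERDICT (by name: the statement is the Claim_ definition above) =====
theorem break_key_spec : Claim_equal_break_key := by
  intro key _
  unfold Spec_break_key
  rw [pv_A_explicit, pv_B_explicit]
  simp only [pv_byte_eq, Int.shiftRight_natCast_right, Int.shiftRight_eq_div_pow]
  norm_num [Int.toNat, PySem.Int.mod_eq_emod_of_pos]
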